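-- pv_equiv track=rewrite | github.com/parfittchris/leetcodePython | string/reverse_words_III.py | reverseOne
-- ===== SOURCE A (Python) =====
-- def reverseOne(word: str) -> str:
--     i = 0
--     j = len(word) - 1
--
--     split_word = list(word)
--
--     while i < j:
--         [split_word[i], split_word[j]] = [split_word[j], split_word[i]]
--
--         i += 1
--         j -= 1
--
--     return "".join(split_word)
-- ===== SOURCE B (Python) =====
-- def reverseOne(word: str) -> str:
--     result = ""
--     for ch in word:
--         result = ch + result
--     return result
-- ===== Notes on version B (the rewrite author's own statement) =====
-- stated objective: simpler
-- what changed: Replaces the two-pointer in-place swap over a char list with a single forward pass that prepends each character to a string accumulator.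
import Mathlib
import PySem

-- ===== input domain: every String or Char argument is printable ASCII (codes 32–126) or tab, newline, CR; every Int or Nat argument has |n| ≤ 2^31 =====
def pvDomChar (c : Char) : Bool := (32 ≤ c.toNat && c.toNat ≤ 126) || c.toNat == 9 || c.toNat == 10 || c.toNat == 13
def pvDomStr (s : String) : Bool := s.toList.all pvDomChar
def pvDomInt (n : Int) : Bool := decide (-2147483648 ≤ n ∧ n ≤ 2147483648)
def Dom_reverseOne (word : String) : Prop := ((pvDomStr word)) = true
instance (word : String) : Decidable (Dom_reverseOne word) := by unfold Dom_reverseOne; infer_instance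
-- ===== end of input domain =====

-- B replaces A's two-pointer in-place swap with a single forward pass prepending each char to an accumulator (simpler decomposition).

-- ===== PORT A =====
-- indexing helper: split_word[k]; the loop only ever reads indices 0 ≤ i < j < len, so the default is never used
def pvIdx (l : List Char) (k : Int) : Char := (PySem.List.pyGet? l k).getD ' '

-- the while loop: simultaneous assignment [l[i], l[j]] = [l[j], l[i]] (both reads before either write), then i += 1, j -= 1
def swapLoop (l : List Char) (i j : Int) : List Char :=
  if i < j then
    swapLoop ((l.set i.toNat (pvIdx l j)).set j.toNat (pvIdx l i)) (i + 1) (j - 1)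
  else l
termination_by (j - i).toNat
decreasing_by omega

def reverseOne (word : String) : String :=
  String.ofList (swapLoop word.toList 0 ((word.toList.length : Int) - 1))

-- ===== PORT B =====
-- result = ""; for ch in word: result = ch + result  (the growing string kept as its char list; made a String at the end)
def reverseOne_alt (word : String) : String :=
  String.ofList (word.toList.foldl (fun acc ch => ch :: acc) [])

-- ===== PRECONDITION & SPEC =====
def Spec_reverseOne (word : String) (out : String) : Prop := out = reverseOne_alt word
instance (word : String) (out : String) : Decidable (Spec_reverseOne word out) := by unfold Spec_reverseOne; infer_instance

-- ===== CLAIM (what is proved, stated in full; the proofs are below) =====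
def Claim_equal_reverseOne : Prop := ∀ (word : String), Dom_reverseOne word → Spec_reverseOne word (reverseOne word)

-- ===== LEMMAS AND PROOFS =====

theorem foldl_cons_rev (l acc : List Char) :
    l.foldl (fun acc ch => ch :: acc) acc = l.reverse ++ acc := by
  induction l generalizing acc with
  | nil => simp
  | cons a t ih => simp [List.foldl, ih]

theorem pvIdx_append_len (p : List Char) (a : Char) (t : List Char) :
    pvIdx (p ++ a :: t) (p.length : Int) = a := by
  simp [pvIdx]

theorem set_append_len (p : List Char) (a v : Char) (t : List Char) :
    (p ++ a :: t).set p.length v = p ++ v :: t := by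
  induction p with
  | nil => simp
  | cons x xs ih => simp [ih]

theorem swapLoop_inv :
    ∀ n (mid p s : List Char), mid.length = n → p.length = s.length →
      swapLoop (p ++ mid ++ s) (p.length : Int) ((p.length : Int) + mid.length - 1)
        = p ++ mid.reverse ++ s := by
  intro n
  induction n using Nat.strong_induction_on with
  | _ n ih =>
    intro mid p s hlen hps
    by_cases hn : n < 2
    · -- i ≥ j: loop exits at once; a middle of length ≤ 1 is its own reverse
      rw [swapLoop]
      rw [if_neg (by omega)]
      interval_cases n <;>
        (rcases mid with _ | ⟨a, t⟩ <;> simp_all)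
    · -- n ≥ 2 : mid = a :: m ++ [b]
      rcases mid with _ | ⟨a, t⟩
      · simp at hlen; omega
      have ht : t ≠ [] := by
        intro h; subst h; simp at hlen; omega
      rcases List.eq_nil_or_concat t with h' | ⟨m, b, h'⟩
      · exact absurd h' ht
      rw [List.concat_eq_append] at h'
      subst h'
      have hm : m.length = n - 2 := by simp at hlen; omega
      rw [swapLoop, if_pos (by simp; omega)]
      -- read the two cells
      have hj : ((p.length : Int) + (a :: (m ++ [b])).length - 1) = ((p ++ a :: m).length : Int) := by
        simp; ring
      have hread_j : pvIdx (p ++ a :: (m ++ [b]) ++ s) ((p.length : Int) + (a :: (m ++ [b])).length - 1) = b := by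
        rw [hj]
        have : p ++ a :: (m ++ [b]) ++ s = (p ++ a :: m) ++ b :: s := by simp
        rw [this, pvIdx_append_len]
      have hread_i : pvIdx (p ++ a :: (m ++ [b]) ++ s) (p.length : Int) = a := by
        have : p ++ a :: (m ++ [b]) ++ s = p ++ a :: (m ++ [b] ++ s) := by simp
        rw [this, pvIdx_append_len]
      rw [hread_i, hread_j]
      -- perform the two writes
      have hi_toNat : ((p.length : Int)).toNat = p.length := by simp
      have hset1 : (p ++ a :: (m ++ [b]) ++ s).set ((p.length : Int)).toNat b
          = p ++ b :: (m ++ [b] ++ s) := by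
        rw [hi_toNat]
        have : p ++ a :: (m ++ [b]) ++ s = p ++ a :: (m ++ [b] ++ s) := by simp
        rw [this, set_append_len]
      have hj_toNat : (((p.length : Int) + (a :: (m ++ [b])).length - 1)).toNat = (p ++ b :: m).length := by
        simp; omega
      have hset2 : (p ++ b :: (m ++ [b] ++ s)).set (((p.length : Int) + (a :: (m ++ [b])).length - 1)).toNat a
          = (p ++ [b]) ++ m ++ (a :: s) := by
        rw [hj_toNat]
        have : p ++ b :: (m ++ [b] ++ s) = (p ++ b :: m) ++ b :: s := by simp
        rw [this, set_append_len]
        simp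
      rw [hset1, hset2]
      -- recurse on the shorter middle via the IH
      have harg1 : (p.length : Int) + 1 = (((p ++ [b]).length : Int)) := by simp
      have harg2 : (p.length : Int) + (a :: (m ++ [b])).length - 1 - 1
          = ((p ++ [b]).length : Int) + (m.length : Int) - 1 := by simp; ring
      rw [harg1, harg2]
      have := ih m.length (by omega) m (p ++ [b]) (a :: s) rfl (by simp [← hps])
      rw [this]
      simp

theorem swapLoop_reverse (l : List Char) :
    swapLoop l 0 ((l.length : Int) - 1) = l.reverse := by
  have h := swapLoop_inv l.length l [] [] rfl rfl
  simpa using h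

-- ===== VERDICT (by name: the statement is the Claim_ definition above) =====
theorem reverseOne_spec : Claim_equal_reverseOne := by
  intro word _
  unfold Spec_reverseOne reverseOne reverseOne_alt
  rw [swapLoop_reverse, foldl_cons_rev]
  simp
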